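-- pv_equiv track=rewrite | github.com/infCraft/SkyReels-V3 | scripts/generate_skip_list.py | get_blocks_to_skip
-- ===== SOURCE A (Python) =====
-- def get_blocks_to_skip(interval, stride):
--     """
--     在一个冗余区间内，按 stride 分段，保留每段头部 block，
--     其余 block 作为 skip 返回。
--
--     例如 interval = [15, 20]（6 blocks），stride = 3:
--         chunk1 = [15, 16, 17] → keep 15, skip 16, 17
--         chunk2 = [18, 19, 20] → keep 18, skip 19, 20
--         最后剩余不足 stride 个也只保留头部。
--     """
--     if stride <= 1:
--         return []
--
--     start = interval["start_block"]
--     num = interval["num_blocks"]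
--     blocks = list(range(start, start + num))
--
--     skip = []
--     for i, b in enumerate(blocks):
--         # 每 stride 个 block 中，只有 i % stride == 0 的是"头部"，保留
--         if i % stride != 0:
--             skip.append(b)
--     return skip
-- ===== SOURCE B (Python) =====
-- def get_blocks_to_skip(interval, stride):
--     if stride <= 1:
--         return []
--     start = interval["start_block"]
--     num = interval["num_blocks"]
--     blocks = list(range(start, start + num))
--     skip = []
--     while blocks:
--         skip.extend(blocks[1:stride])
--         blocks = blocks[stride:]
--     return skip
-- ===== Notes on version B (the rewrite author's own statement) =====
-- stated objective: alternative
-- what changed: Replaces A's flat enumerate-plus-modulo filter with a destructive while-loop that repeatedly slices off one chunk of the blocks list (extend with blocks[1:stride], then blocks = blocks[stride:]), so no index counter or modulus appears at all.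
import Mathlib
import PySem

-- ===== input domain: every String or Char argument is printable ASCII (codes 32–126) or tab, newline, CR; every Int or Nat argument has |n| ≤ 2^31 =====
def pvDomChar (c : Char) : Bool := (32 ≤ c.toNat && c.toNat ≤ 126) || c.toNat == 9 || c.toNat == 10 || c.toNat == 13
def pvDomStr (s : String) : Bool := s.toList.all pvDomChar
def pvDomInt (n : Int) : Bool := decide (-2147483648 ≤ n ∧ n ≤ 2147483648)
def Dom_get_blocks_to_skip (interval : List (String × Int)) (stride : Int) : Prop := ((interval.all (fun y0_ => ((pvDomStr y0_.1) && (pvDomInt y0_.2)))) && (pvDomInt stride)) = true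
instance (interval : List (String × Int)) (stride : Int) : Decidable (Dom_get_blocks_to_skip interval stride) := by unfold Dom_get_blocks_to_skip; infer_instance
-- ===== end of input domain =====

-- B replaces A's enumerate+modulo filter with a while-loop slicing one chunk off the
-- blocks list per step (objective: alternative decomposition; not faster).

-- ===== PORT A =====
def get_blocks_to_skip (interval : List (String × Int)) (stride : Int) : List Int :=
  if stride ≤ 1 then []
  else
    let start := (interval.lookup "start_block").getD 0
    let num := (interval.lookup "num_blocks").getD 0
    let blocks := PySem.List.pyRange start (start + num) 1
    (PySem.List.enumerate blocks).foldl
      (fun skip ib => if PySem.Int.mod ib.1 stride ≠ 0 then skip ++ [ib.2] else skip) []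

-- ===== PORT B =====
-- the while-loop of Source B: extend skip with blocks[1:stride], drop blocks[:stride], repeat
def pvChunkLoop (stride : Int) (hs : 2 ≤ stride) (skip : List Int) (blocks : List Int) :
    List Int :=
  match blocks with
  | [] => skip
  | b :: bs =>
    pvChunkLoop stride hs (skip ++ PySem.List.slice (b :: bs) (some 1) (some stride))
      (PySem.List.slice (b :: bs) (some stride) none)
termination_by blocks.length
decreasing_by
  rw [PySem.List.slice_from _ (by omega : (0:Int) ≤ stride)]
  simp only [List.length_drop, List.length_cons]
  omega

def get_blocks_to_skip_alt (interval : List (String × Int)) (stride : Int) : List Int :=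
  if h : stride ≤ 1 then []
  else
    let start := (interval.lookup "start_block").getD 0
    let num := (interval.lookup "num_blocks").getD 0
    pvChunkLoop stride (by omega) [] (PySem.List.pyRange start (start + num) 1)

-- ===== PRECONDITION & SPEC =====
-- Pre_ excludes only the inputs on which Python A raises KeyError: stride > 1 with
-- "start_block" or "num_blocks" missing from the dict (B raises there too).
def Pre_get_blocks_to_skip (interval : List (String × Int)) (stride : Int) : Prop :=
  stride ≤ 1 ∨ ((interval.lookup "start_block").isSome = true ∧ (interval.lookup "num_blocks").isSome = true)
instance (interval : List (String × Int)) (stride : Int) : Decidable (Pre_get_blocks_to_skip interval stride) := by unfold Pre_get_blocks_to_skip; infer_instance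
def pvWitness_get_blocks_to_skip : (List (String × Int)) × Int := ([("start_block", 15), ("num_blocks", 6)], 3)

def Spec_get_blocks_to_skip (interval : List (String × Int)) (stride : Int) (out : List Int) : Prop := out = get_blocks_to_skip_alt interval stride
instance (interval : List (String × Int)) (stride : Int) (out : List Int) : Decidable (Spec_get_blocks_to_skip interval stride out) := by unfold Spec_get_blocks_to_skip; infer_instance

-- ===== CLAIM =====
def Claim_equal_get_blocks_to_skip : Prop := ∀ (interval : List (String × Int)) (stride : Int), Dom_get_blocks_to_skip interval stride → Pre_get_blocks_to_skip interval stride → Spec_get_blocks_to_skip interval stride (get_blocks_to_skip interval stride)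

-- ===== LEMMAS AND PROOFS =====

lemma pv_mod_small (j s : Int) (h0 : 0 ≤ j) (h1 : j < s) : PySem.Int.mod j s = j := by
  show Int.fmod j s = j
  rw [Int.fmod_eq_emod_of_nonneg _ (le_of_lt (lt_of_le_of_lt h0 h1))]
  exact Int.emod_eq_of_lt h0 h1

lemma pv_mod_shift (j s : Int) : PySem.Int.mod (j + s) s = PySem.Int.mod j s := by
  show Int.fmod (j + s) s = Int.fmod j s
  simp

-- enumerate with a shifted start is a shift of enumerate
lemma pv_enum_shift (xs : List Int) : ∀ (a k : Int),
    PySem.List.enumerate xs (a + k) = (PySem.List.enumerate xs a).map (fun p => (p.1 + k, p.2)) := by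
  induction xs with
  | nil => intro a k; simp [PySem.List.enumerate_nil]
  | cons x xs ih =>
    intro a k
    rw [PySem.List.enumerate_cons, PySem.List.enumerate_cons, List.map_cons]
    refine congrArg₂ List.cons rfl ?_
    have h : a + k + 1 = (a + 1) + k := by ring
    rw [h, ih]

-- a short block (length ≤ s): the modulo filter keeps every index except 0
lemma pv_short (s : Int) (hs : 2 ≤ s) (M : List Int) (hM : (M.length : Int) ≤ s) :
    ((PySem.List.enumerate M 0).filter
        (fun ib => decide (PySem.Int.mod ib.1 s ≠ 0))).map (·.2) = M.drop 1 := by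
  cases M with
  | nil => simp [PySem.List.enumerate_nil]
  | cons x xs =>
    rw [PySem.List.enumerate_cons, List.filter_cons]
    have hz : PySem.Int.mod (0:Int) s = 0 := pv_mod_small 0 s le_rfl (by omega)
    rw [if_neg (by simp [hz])]
    rw [show (0:Int) + 1 = 1 from by norm_num]
    have hkeep : (PySem.List.enumerate xs 1).filter
        (fun ib => decide (PySem.Int.mod ib.1 s ≠ 0)) = PySem.List.enumerate xs 1 := by
      apply List.filter_eq_self.mpr
      intro p hp
      rcases (PySem.List.mem_enumerate_iff _ _ _).mp hp with ⟨k, hk, hpk⟩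
      have h1 : (0:Int) < p.1 := by rw [hpk]; push_cast; omega
      have h2 : p.1 < s := by
        rw [hpk]
        simp only [List.length_cons] at hM
        push_cast
        push_cast at hM
        omega
      have := pv_mod_small p.1 s (le_of_lt h1) h2
      simp [this]
      omega
    rw [hkeep, PySem.List.map_snd_enumerate]
    simp

-- the chunk loop of B equals A's filtered/mapped enumerate (fuel induction on length)
lemma pv_chunk_eq (s : Int) (hs : 2 ≤ s) : ∀ (N : Nat) (L : List Int), L.length ≤ N →
    ∀ (skip : List Int),
    pvChunkLoop s hs skip L
      = skip ++ ((PySem.List.enumerate L 0).filter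
          (fun ib => decide (PySem.Int.mod ib.1 s ≠ 0))).map (·.2) := by
  intro N
  induction N with
  | zero =>
    intro L hL skip
    have : L = [] := List.eq_nil_of_length_eq_zero (by omega)
    subst this
    rw [pvChunkLoop.eq_def]; simp [PySem.List.enumerate_nil]
  | succ N ih =>
    intro L hL skip
    cases L with
    | nil => rw [pvChunkLoop.eq_def]; simp [PySem.List.enumerate_nil]
    | cons b bs =>
      rw [pvChunkLoop.eq_def]
      simp only []
      set L := b :: bs with hLdef
      have hslice1 : PySem.List.slice L (some 1) (some s)
          = (L.drop 1).take (s.toNat - 1) := by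
        rw [PySem.List.slice_toNat _ (by omega) (by omega)]
        norm_num
      have hsliceS : PySem.List.slice L (some s) none = L.drop s.toNat :=
        PySem.List.slice_from _ (by omega)
      rw [hslice1, hsliceS,
        ih (L.drop s.toNat) (by simp only [hLdef, List.length_drop, List.length_cons] at hL ⊢; omega)]
      -- decompose L = take ++ drop and its enumerate
      have hsplit : L = L.take s.toNat ++ L.drop s.toNat := (List.take_append_drop _ _).symm
      have htlen : ((L.take s.toNat).length : Int) ≤ s := by
        simp [List.length_take]; omega
      conv_lhs => rw [show (L.drop 1).take (s.toNat - 1) = (L.take s.toNat).drop 1 by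
        rw [List.drop_take]]
      conv_rhs => rw [hsplit]
      rw [PySem.List.enumerate_append, List.filter_append, List.map_append, List.append_assoc]
      refine congrArg₂ (· ++ ·) rfl ?_
      rw [pv_short s hs _ htlen]
      refine congrArg₂ (· ++ ·) rfl ?_
      -- second part: shift the start of enumerate by take-length and kill it with mod
      by_cases hlong : s.toNat ≤ L.length
      · have hlen : ((L.take s.toNat).length : Int) = s := by
          simp [List.length_take]; omega
        rw [show (0 : Int) + ((L.take s.toNat).length : Int) = 0 + s by rw [hlen],
          pv_enum_shift, List.filter_map]
        have hpred : ((fun ib : Int × Int => decide (PySem.Int.mod ib.1 s ≠ 0))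
            ∘ (fun p : Int × Int => (p.1 + s, p.2)))
            = (fun ib : Int × Int => decide (PySem.Int.mod ib.1 s ≠ 0)) := by
          funext p; simp [Function.comp, pv_mod_shift]
        rw [hpred, List.map_map]
        simp [Function.comp]
      · have hdrop : L.drop s.toNat = [] := List.drop_eq_nil_of_le (by omega)
        rw [hdrop]
        simp [PySem.List.enumerate_nil]

-- ===== VERDICT =====
theorem get_blocks_to_skip_spec : Claim_equal_get_blocks_to_skip := by
  intro interval stride _ _
  unfold Spec_get_blocks_to_skip get_blocks_to_skip get_blocks_to_skip_alt
  by_cases h1 : stride ≤ 1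
  · simp [h1]
  · simp only [if_neg h1, dif_neg h1]
    have hs : 2 ≤ stride := by omega
    set blocks := PySem.List.pyRange ((interval.lookup "start_block").getD 0)
      (((interval.lookup "start_block").getD 0) + ((interval.lookup "num_blocks").getD 0)) 1
    rw [PySem.List.foldl_append_ite (fun ib : Int × Int => PySem.Int.mod ib.1 stride ≠ 0)
        (fun ib : Int × Int => ib.2), List.nil_append,
      pv_chunk_eq stride hs blocks.length blocks le_rfl [], List.nil_append]
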